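-- pv_equiv track=rewrite | github.com/chulbioinfo/ConVarFinder | bin/ConVarFinder_final.py | read_tre_removing_branchlength
-- ===== SOURCE A (Python) =====
-- def read_tre_removing_branchlength(nTree):
--   line = nTree.strip(";")
--   if ":" in line:
--     tmp_node_winfo_list = []
--     node_winfo_list = line.split(")")
--     for node_winfo in node_winfo_list:
--       if ',' in node_winfo:
--         nodeID_list = []
--         for eachnode_winfo in node_winfo.split(","):
--           nodeID = eachnode_winfo.split(":")[0]
--           nodeID_list.append(nodeID)
--         tmp_node_winfo_list.append(','.join(nodeID_list))
--       else:
--         nodeID = node_winfo.split(":")[0]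
--         tmp_node_winfo_list.append(nodeID)
--     line = ')'.join(tmp_node_winfo_list)+';'
--   return line
-- ===== SOURCE B (Python) =====
-- def read_tre_removing_branchlength(nTree):
--   line = nTree.strip(";")
--   if ":" not in line:
--     return line
--   out = []
--   skipping = False
--   for ch in line:
--     if ch == ':':
--       skipping = True
--     elif ch == ',' or ch == ')':
--       skipping = False
--       out.append(ch)
--     elif not skipping:
--       out.append(ch)
--   return ''.join(out) + ';'
-- ===== Notes on version B (the rewrite author's own statement) =====
-- stated objective: simpler
-- what changed: Replaces the nested split(')')/split(',')/split(':')[0]/join passes by one linear character scan with a 'skipping' flag that drops text between a ':' and the next ',' or ')'.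
import Mathlib
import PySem

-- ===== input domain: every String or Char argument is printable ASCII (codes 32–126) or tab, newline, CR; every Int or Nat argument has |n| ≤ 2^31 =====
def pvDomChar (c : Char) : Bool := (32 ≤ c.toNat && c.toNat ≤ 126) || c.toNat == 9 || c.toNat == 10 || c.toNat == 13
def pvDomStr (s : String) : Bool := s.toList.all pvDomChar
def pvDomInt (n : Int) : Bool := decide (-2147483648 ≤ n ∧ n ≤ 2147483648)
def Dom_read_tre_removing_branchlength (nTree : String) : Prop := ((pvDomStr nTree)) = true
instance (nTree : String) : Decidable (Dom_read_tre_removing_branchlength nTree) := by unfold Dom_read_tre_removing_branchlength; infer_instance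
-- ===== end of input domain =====

-- B replaces A's nested split(')')/split(',')/split(':')[0]/join passes by a single linear scan with a skip flag (simpler decomposition); proved equal on all inputs.


-- ===== PORT A =====
-- literal transliteration of A; the two for-loops are foldl's over the accumulator lists.
-- Python's `lst[0]` on a split result is ported as `.headD []`: split always returns a nonempty list, so this is exact.
def read_tre_removing_branchlength (nTree : String) : String :=
  let line := PySem.Chars.stripChars nTree.toList [';']
  if PySem.Chars.isIn [':'] line then
    let tmp_node_winfo_list := (PySem.Chars.splitOn line [')']).foldl (fun acc node_winfo =>
      if PySem.Chars.isIn [','] node_winfo then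
        let nodeID_list := (PySem.Chars.splitOn node_winfo [',']).foldl (fun acc2 eachnode_winfo =>
          acc2 ++ [(PySem.Chars.splitOn eachnode_winfo [':']).headD []]) []
        acc ++ [PySem.Chars.join [','] nodeID_list]
      else
        acc ++ [(PySem.Chars.splitOn node_winfo [':']).headD []]) []
    String.ofList (PySem.Chars.join [')'] tmp_node_winfo_list ++ [';'])
  else
    String.ofList line

-- ===== PORT B =====
-- the single-pass scan of Source B: the Bool is the `skipping` flag
def pvScan : Bool → List Char → List Char
  | _, [] => []
  | skipping, c :: rest =>
    if c = ':' then pvScan true rest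
    else if c = ',' ∨ c = ')' then c :: pvScan false rest
    else if skipping then pvScan skipping rest
    else c :: pvScan skipping rest

def read_tre_removing_branchlength_alt (nTree : String) : String :=
  let line := PySem.Chars.stripChars nTree.toList [';']
  if PySem.Chars.isIn [':'] line then
    String.ofList (pvScan false line ++ [';'])
  else
    String.ofList line

-- ===== PRECONDITION & SPEC =====
def Spec_read_tre_removing_branchlength (nTree : String) (out : String) : Prop := out = read_tre_removing_branchlength_alt nTree
instance (nTree : String) (out : String) : Decidable (Spec_read_tre_removing_branchlength nTree out) := by unfold Spec_read_tre_removing_branchlength; infer_instance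

-- ===== CLAIM (what is proved, stated in full; the proofs are below) =====
def Claim_equal_read_tre_removing_branchlength : Prop := ∀ (nTree : String), Dom_read_tre_removing_branchlength nTree → Spec_read_tre_removing_branchlength nTree (read_tre_removing_branchlength nTree)

-- ===== LEMMAS AND PROOFS =====

-- PySem.Chars.splitOn with a single-character separator is Mathlib's List.splitOnP
theorem pv_go_spec (d : Char) : ∀ (fuel : Nat) (l cur : List Char) (acc : List (List Char)),
    l.length < fuel →
    PySem.Chars.splitOn.go [d] fuel l cur acc
      = acc.reverse ++ (List.splitOnP (· == d) l).modifyHead (cur.reverse ++ ·) := by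
  intro fuel
  induction fuel with
  | zero => intro l cur acc h; omega
  | succ n ih =>
    intro l cur acc h
    cases l with
    | nil =>
      rw [PySem.Chars.splitOn.go.eq_def]
      simp [List.splitOnP_nil]
    | cons c rest =>
      rw [PySem.Chars.splitOn.go.eq_def]
      simp only [List.isPrefixOf, List.splitOnP_cons]
      by_cases hdc : d = c
      · subst hdc
        simp only [beq_self_eq_true, Bool.and_self, if_pos, List.drop_succ_cons, List.drop_zero,
          List.length_singleton]
        rw [ih rest [] (cur.reverse :: acc) (by simpa using Nat.lt_of_succ_lt_succ h)]
        simp [List.modifyHead]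
        cases hs : List.splitOnP (fun x => x == d) rest with
        | nil => exact absurd hs (List.splitOnP_ne_nil _ _)
        | cons a t => simp
      · have h1 : (d == c) = false := by simp [hdc]
        have h2 : (c == d) = false := by simp [Ne.symm hdc]
        simp only [h1, h2, Bool.false_and, Bool.false_eq_true, if_false]
        rw [ih rest (c :: cur) acc (by simpa using Nat.lt_of_succ_lt_succ h)]
        cases hs : List.splitOnP (fun x => x == d) rest with
        | nil => exact absurd hs (List.splitOnP_ne_nil _ _)
        | cons a t => simp

theorem pv_splitOn_single (s : List Char) (d : Char) :
    PySem.Chars.splitOn s [d] = List.splitOnP (· == d) s := by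
  rw [PySem.Chars.splitOn, pv_go_spec d (s.length + 1) s [] [] (by omega)]
  cases hs : List.splitOnP (· == d) s with
  | nil => exact absurd hs (List.splitOnP_ne_nil _ _)
  | cons a t => simp

theorem pv_head_splitOnP (p : Char → Bool) (s : List Char) :
    (List.splitOnP p s).headD [] = s.takeWhile (fun c => !p c) := by
  induction s with
  | nil => simp [List.splitOnP_nil]
  | cons c rest ih =>
    rw [List.splitOnP_cons, List.takeWhile_cons]
    by_cases hc : p c
    · simp [hc]
    · simp only [hc, Bool.false_eq_true, if_false, Bool.not_false, if_true]
      cases hs : List.splitOnP p rest with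
      | nil => exact absurd hs (List.splitOnP_ne_nil _ _)
      | cons a t => rw [hs] at ih; simpa using congrArg (List.cons c) ih

theorem pv_splitOnP_not_mem (p : Char → Bool) (s : List Char) (h : ∀ c ∈ s, p c = false) :
    List.splitOnP p s = [s] := by
  induction s with
  | nil => simp [List.splitOnP_nil]
  | cons c rest ih =>
    rw [List.splitOnP_cons, h c (List.mem_cons_self), if_neg (by simp)]
    rw [ih (fun x hx => h x (List.mem_cons_of_mem _ hx))]
    simp

theorem pv_isIn_single (c : Char) (s : List Char) :
    PySem.Chars.isIn [c] s = true ↔ c ∈ s := by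
  rw [PySem.Chars.isIn_iff_infix]
  constructor
  · intro hinf; exact List.singleton_sublist.mp hinf.sublist
  · intro hm
    obtain ⟨l, r, rfl⟩ := List.append_of_mem hm
    exact ⟨l, r, by simp⟩

-- the per-`)`-segment value A computes, in uniform form, and A's whole transformation
def pvSeg (s : List Char) : List Char :=
  PySem.Chars.join [','] ((List.splitOnP (· == ',') s).map (List.takeWhile (fun c => !(c == ':'))))

def pvAgg (cs : List Char) : List Char :=
  PySem.Chars.join [')'] ((List.splitOnP (· == ')') cs).map pvSeg)

-- characters dropped while the scan is skipping
def pvQ (c : Char) : Bool := !(c == ',') && !(c == ')')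

theorem pv_join_head_cons (sep : List Char) (c : Char) (x : List Char) (rest : List (List Char)) :
    PySem.Chars.join sep ((c :: x) :: rest) = c :: PySem.Chars.join sep (x :: rest) := by
  cases rest with
  | nil => simp [PySem.Chars.join_singleton]
  | cons q t => rw [PySem.Chars.join_cons_cons, PySem.Chars.join_cons_cons]; simp

theorem pv_scan_true (cs : List Char) : pvScan true cs = pvScan false (cs.dropWhile pvQ) := by
  induction cs with
  | nil => rfl
  | cons c rest ih =>
    by_cases hc : c = ':'
    · subst hc
      rw [List.dropWhile_cons_of_pos (by decide)]
      simpa [pvScan] using ih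
    · by_cases hd : c = ',' ∨ c = ')'
      · have hq : pvQ c = false := by rcases hd with rfl | rfl <;> decide
        rw [List.dropWhile_cons_of_neg (by simp [hq])]
        simp [pvScan, hc, hd]
      · have hq : pvQ c = true := by
          simp [pvQ]; push Not at hd; exact ⟨hd.1, hd.2⟩
        rw [List.dropWhile_cons_of_pos hq]
        simpa [pvScan, hc, hd] using ih

theorem pvSeg_nil : pvSeg [] = [] := by simp [pvSeg, List.splitOnP_nil, PySem.Chars.join_singleton]

theorem pvSeg_comma (s : List Char) : pvSeg (','::s) = ',' :: pvSeg s := by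
  unfold pvSeg
  cases hs : List.splitOnP (· == ',') s with
  | nil => exact absurd hs (List.splitOnP_ne_nil _ _)
  | cons a t =>
    simp only [List.splitOnP_cons, hs, beq_self_eq_true, if_true, List.map_cons, List.takeWhile_nil]
    rw [PySem.Chars.join_cons_cons]; simp

theorem pvSeg_other (c : Char) (s : List Char) (h1 : (c == ',') = false) (h2 : (c == ':') = false) :
    pvSeg (c::s) = c :: pvSeg s := by
  unfold pvSeg
  cases hs : List.splitOnP (· == ',') s with
  | nil => exact absurd hs (List.splitOnP_ne_nil _ _)
  | cons a t =>
    simp only [List.splitOnP_cons, hs, h1, Bool.false_eq_true, if_false, List.modifyHead_cons,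
      List.map_cons, List.takeWhile_cons, h2, Bool.not_false, if_true]
    rw [pv_join_head_cons]

theorem pvSeg_colon_absorb (c : Char) (s : List Char) (h1 : (c == ',') = false) :
    pvSeg (':'::c::s) = pvSeg (':'::s) := by
  unfold pvSeg
  cases hs : List.splitOnP (· == ',') s with
  | nil => exact absurd hs (List.splitOnP_ne_nil _ _)
  | cons a t =>
    simp [List.splitOnP_cons, hs, h1, List.takeWhile_cons]

theorem pvSeg_colon_comma (s : List Char) : pvSeg (':'::','::s) = ',' :: pvSeg s := by
  unfold pvSeg
  cases hs : List.splitOnP (· == ',') s with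
  | nil => exact absurd hs (List.splitOnP_ne_nil _ _)
  | cons a t =>
    simp only [List.splitOnP_cons, hs, beq_self_eq_true, if_true, List.modifyHead_cons,
      List.map_cons, List.takeWhile_cons]
    rw [show ((':' == ',') = false) from rfl]
    simp only [Bool.false_eq_true, if_false, List.modifyHead_cons, List.map_cons,
      List.takeWhile_cons, show ((!(':' == ':')) = false) from rfl]
    rw [PySem.Chars.join_cons_cons]; simp

theorem pvAgg_nil : pvAgg [] = [] := by
  simp [pvAgg, List.splitOnP_nil, pvSeg_nil, PySem.Chars.join_singleton]

theorem pvAgg_rpar (cs : List Char) : pvAgg (')'::cs) = ')' :: pvAgg cs := by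
  unfold pvAgg
  cases hs : List.splitOnP (· == ')') cs with
  | nil => exact absurd hs (List.splitOnP_ne_nil _ _)
  | cons a t =>
    simp only [List.splitOnP_cons, hs, beq_self_eq_true, if_true, List.map_cons, pvSeg_nil]
    rw [PySem.Chars.join_cons_cons]; simp

theorem pvAgg_step (c : Char) (cs : List Char) (hp : (c == ')') = false)
    (hseg : ∀ s, pvSeg (c::s) = c :: pvSeg s) : pvAgg (c::cs) = c :: pvAgg cs := by
  unfold pvAgg
  cases hs : List.splitOnP (· == ')') cs with
  | nil => exact absurd hs (List.splitOnP_ne_nil _ _)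
  | cons a t =>
    simp only [List.splitOnP_cons, hs, hp, Bool.false_eq_true, if_false, List.modifyHead_cons,
      List.map_cons, hseg]
    rw [pv_join_head_cons]

theorem pvAgg_comma (cs : List Char) : pvAgg (','::cs) = ',' :: pvAgg cs :=
  pvAgg_step ',' cs rfl pvSeg_comma

theorem pvAgg_other (c : Char) (cs : List Char) (h1 : (c == ',') = false)
    (h2 : (c == ')') = false) (h3 : (c == ':') = false) : pvAgg (c::cs) = c :: pvAgg cs :=
  pvAgg_step c cs h2 (fun s => pvSeg_other c s h1 h3)

theorem pvAgg_colon_absorb (c : Char) (cs : List Char) (h1 : (c == ',') = false)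
    (h2 : (c == ')') = false) : pvAgg (':'::c::cs) = pvAgg (':'::cs) := by
  unfold pvAgg
  cases hs : List.splitOnP (· == ')') cs with
  | nil => exact absurd hs (List.splitOnP_ne_nil _ _)
  | cons a t =>
    simp only [List.splitOnP_cons, hs, h2, Bool.false_eq_true, if_false, List.modifyHead_cons,
      List.map_cons]
    rw [show ((':' == ')') = false) from rfl]
    simp only [Bool.false_eq_true, if_false, List.modifyHead_cons, List.map_cons,
      pvSeg_colon_absorb c a h1]

theorem pvAgg_colon_rpar (cs : List Char) : pvAgg (':'::')'::cs) = ')' :: pvAgg cs := by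
  unfold pvAgg
  cases hs : List.splitOnP (· == ')') cs with
  | nil => exact absurd hs (List.splitOnP_ne_nil _ _)
  | cons a t =>
    simp only [List.splitOnP_cons, hs, beq_self_eq_true, if_true]
    rw [show ((':' == ')') = false) from rfl]
    simp only [Bool.false_eq_true, if_false, List.modifyHead_cons, List.map_cons]
    rw [show pvSeg [':'] = [] by decide, PySem.Chars.join_cons_cons]
    simp

theorem pvAgg_colon_comma (cs : List Char) : pvAgg (':'::','::cs) = ',' :: pvAgg cs := by
  unfold pvAgg
  cases hs : List.splitOnP (· == ')') cs with
  | nil => exact absurd hs (List.splitOnP_ne_nil _ _)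
  | cons a t =>
    simp only [List.splitOnP_cons, hs]
    rw [show ((':' == ')') = false) from rfl, show ((',' == ')') = false) from rfl]
    simp only [Bool.false_eq_true, if_false, List.modifyHead_cons, List.map_cons,
      pvSeg_colon_comma, pvSeg_comma]
    rw [pv_join_head_cons]

theorem pvAgg_colon_drop (cs : List Char) : pvAgg (':'::cs) = pvAgg (cs.dropWhile pvQ) := by
  induction cs with
  | nil => rw [List.dropWhile_nil]; decide
  | cons c rest ih =>
    by_cases h1 : c = ','
    · subst h1
      rw [List.dropWhile_cons_of_neg (by decide), pvAgg_colon_comma, pvAgg_comma]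
    · by_cases h2 : c = ')'
      · subst h2
        rw [List.dropWhile_cons_of_neg (by decide), pvAgg_colon_rpar, pvAgg_rpar]
      · have hq : pvQ c = true := by simp [pvQ, h1, h2]
        rw [List.dropWhile_cons_of_pos hq,
          pvAgg_colon_absorb c rest (by simp [h1]) (by simp [h2]), ih]

theorem pv_scan_eq_agg (cs : List Char) : pvScan false cs = pvAgg cs := by
  have H : ∀ n (cs : List Char), cs.length ≤ n → pvScan false cs = pvAgg cs := by
    intro n
    induction n with
    | zero => intro cs h; rw [List.length_eq_zero_iff.mp (Nat.le_zero.mp h)]; exact pvAgg_nil.symm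
    | succ n ih =>
      intro cs h
      cases cs with
      | nil => exact pvAgg_nil.symm
      | cons c rest =>
        by_cases hc : c = ':'
        · subst hc
          show pvScan true rest = _
          rw [pv_scan_true, ih (rest.dropWhile pvQ)
            (le_trans (List.length_dropWhile_le _ _) (by simpa using Nat.le_of_succ_le_succ h)),
            pvAgg_colon_drop]
        · by_cases h1 : c = ','
          · subst h1
            show ',' :: pvScan false rest = _
            rw [ih rest (by simpa using Nat.le_of_succ_le_succ h), pvAgg_comma]
          · by_cases h2 : c = ')'
            · subst h2
              show ')' :: pvScan false rest = _
              rw [ih rest (by simpa using Nat.le_of_succ_le_succ h), pvAgg_rpar]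
            · rw [show pvScan false (c::rest) = c :: pvScan false rest by
                simp [pvScan, hc, h1, h2]]
              rw [ih rest (by simpa using Nat.le_of_succ_le_succ h),
                pvAgg_other c rest (by simp [h1]) (by simp [h2]) (by simp [hc])]
  exact H cs.length cs le_rfl

-- A's per-segment branch computes pvSeg
theorem pv_branch_eq_seg (s : List Char) :
    (if PySem.Chars.isIn [','] s then
      PySem.Chars.join [','] ((PySem.Chars.splitOn s [',']).map
        (fun e => (PySem.Chars.splitOn e [':']).headD []))
    else (PySem.Chars.splitOn s [':']).headD []) = pvSeg s := by
  have hh : ∀ e : List Char, (PySem.Chars.splitOn e [':']).headD []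
      = e.takeWhile (fun c => !(c == ':')) := by
    intro e; rw [pv_splitOn_single]; exact pv_head_splitOnP _ e
  by_cases hin : PySem.Chars.isIn [','] s = true
  · rw [if_pos hin, pvSeg, pv_splitOn_single]
    congr 1
    exact List.map_congr_left (fun e _ => hh e)
  · rw [if_neg hin]
    have hmem : ∀ c ∈ s, (c == ',') = false := by
      intro c hc
      by_contra hb
      exact hin ((pv_isIn_single ',' s).mpr (by
        have : c = ',' := by simpa using hb
        exact this ▸ hc))
    rw [pvSeg, pv_splitOnP_not_mem _ s hmem, List.map_singleton, PySem.Chars.join_singleton, hh]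

-- A's outer loop builds the map of pvSeg over the `)`-segments
theorem pv_foldl_branch (segs : List (List Char)) (acc : List (List Char)) :
    List.foldl (fun acc node_winfo =>
      if PySem.Chars.isIn [','] node_winfo then
        acc ++ [PySem.Chars.join [','] ((PySem.Chars.splitOn node_winfo [',']).foldl
          (fun acc2 eachnode_winfo => acc2 ++ [(PySem.Chars.splitOn eachnode_winfo [':']).headD []]) [])]
      else acc ++ [(PySem.Chars.splitOn node_winfo [':']).headD []]) acc segs
    = acc ++ segs.map pvSeg := by
  induction segs generalizing acc with
  | nil => simp
  | cons a t ih =>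
    rw [List.foldl_cons, ih]
    by_cases hcase : PySem.Chars.isIn [','] a = true
    · have hb := pv_branch_eq_seg a
      rw [if_pos hcase] at hb
      rw [if_pos hcase, PySem.List.foldl_append_singleton_eq_map, List.nil_append] at *
      rw [hb]; simp
    · have hb := pv_branch_eq_seg a
      rw [if_neg hcase] at hb
      rw [if_neg hcase, hb]; simp

-- ===== VERDICT (by name: the statement is the Claim_ definition above) =====
theorem read_tre_removing_branchlength_spec : Claim_equal_read_tre_removing_branchlength := by
  intro nTree _
  unfold Spec_read_tre_removing_branchlength
  unfold read_tre_removing_branchlength read_tre_removing_branchlength_alt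
  set line := PySem.Chars.stripChars nTree.toList [';'] with hline
  by_cases hin : PySem.Chars.isIn [':'] line = true
  · simp only [hin, if_true]
    rw [pv_foldl_branch, List.nil_append, pv_splitOn_single, pv_scan_eq_agg line]
    rfl
  · simp [hin]
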